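-- pv_equiv track=rewrite | github.com/xiema/codeforces_solutions | src/archive/1665B Array Cloning Technique/arrcloning.py | solve
-- ===== SOURCE A (Python) =====
-- def solve(r, mc):
--     if r == 0:
--         return 0
--     if mc >= r:
--         return 1 + r
--     if mc == 1:
--         return 2 + solve(r - 1, 2)
--     return 1 + mc + solve(r - mc, mc * 2)
-- ===== SOURCE B (Python) =====
-- def solve(r, mc):
--     # Closed form: every recursive step of A costs 1 + (amount r shrinks by),
--     # so the answer is r + 1 + (number of doublings of mc until it covers the rest).
--     if r == 0:
--         return 0
--     m = 2 * mc
--     k = 0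
--     while m < r + mc:
--         m *= 2
--         k += 1
--     return r + 1 + k
-- ===== Notes on version B (the rewrite author's own statement) =====
-- stated objective: alternative
-- what changed: Replaced A's recurrence over (r, mc) by a closed form: since each step costs 1 plus exactly the amount r shrinks by, the answer is r + 1 + k where k is the number of doublings until 2*mc*2^k >= r + mc, so B only counts doublings of a single variable and never updates r.
import Mathlib
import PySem

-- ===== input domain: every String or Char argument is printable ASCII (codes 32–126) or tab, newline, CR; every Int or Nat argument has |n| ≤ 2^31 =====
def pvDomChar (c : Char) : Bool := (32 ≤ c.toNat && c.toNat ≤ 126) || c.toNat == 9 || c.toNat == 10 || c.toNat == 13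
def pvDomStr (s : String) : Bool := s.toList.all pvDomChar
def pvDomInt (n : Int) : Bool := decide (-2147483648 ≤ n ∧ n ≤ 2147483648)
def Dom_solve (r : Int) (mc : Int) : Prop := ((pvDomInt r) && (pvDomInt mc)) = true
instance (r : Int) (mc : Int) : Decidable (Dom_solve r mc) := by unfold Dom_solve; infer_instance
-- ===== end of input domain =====

-- ===== PORT A =====
-- B replaces A's recurrence on (r, mc) by the closed form r + 1 + (#doublings); objective: alternative.
-- Fuel r.toNat + 1 only makes A's recursion total; inside Pre_solve each step shrinks r by at least 1,
-- so fuel is never exhausted and the branches are exactly A's.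
def solveGo : Nat → Int → Int → Int
  | 0, _, _ => 0
  | fuel+1, r, mc =>
    if r = 0 then 0
    else if mc ≥ r then 1 + r
    else if mc = 1 then 2 + solveGo fuel (r - 1) 2
    else 1 + mc + solveGo fuel (r - mc) (mc * 2)

def solve (r : Int) (mc : Int) : Int := solveGo (r.toNat + 1) r mc

-- ===== PORT B =====
-- Source B's while loop counting doublings of m; inside Pre_solve the loop makes at most r.toNat steps
-- (m grows by at least 2 per step), so this fuel is never exhausted.
def altCount : Nat → Int → Int → Int
  | 0, _, _ => 0
  | fuel+1, m, target => if m < target then 1 + altCount fuel (2 * m) target else 0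

def solve_alt (r : Int) (mc : Int) : Int :=
  if r = 0 then 0 else r + 1 + altCount r.toNat (2 * mc) (r + mc)

-- ===== PRECONDITION & SPEC =====
-- Pre_solve excludes exactly the inputs on which the Python A recurses forever
-- (r < 0 with mc < r, or r > 0 with mc ≤ 0): A never returns there (RecursionError).
def Pre_solve (r : Int) (mc : Int) : Prop := r = 0 ∨ mc ≥ r ∨ (0 < r ∧ 1 ≤ mc)
instance (r : Int) (mc : Int) : Decidable (Pre_solve r mc) := by unfold Pre_solve; infer_instance
def pvWitness_solve : Int × Int := (10, 2)
def Spec_solve (r : Int) (mc : Int) (out : Int) : Prop := out = solve_alt r mc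
instance (r : Int) (mc : Int) (out : Int) : Decidable (Spec_solve r mc out) := by unfold Spec_solve; infer_instance

-- ===== CLAIM (what is proved, stated in full; the proofs are below) =====
def Claim_equal_solve : Prop := ∀ (r : Int) (mc : Int), Dom_solve r mc → Pre_solve r mc → Spec_solve r mc (solve r mc)

-- ===== LEMMAS AND PROOFS =====
-- Each step of A costs 1 + (decrease of r) and preserves r + mc, so A's value is
-- r + 1 + (number of doubling steps until mc ≥ remaining), which is what B counts.
lemma solveGo_succ (fuel : Nat) (r mc : Int) :
    solveGo (fuel + 1) r mc =
      (if r = 0 then 0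
       else if mc ≥ r then 1 + r
       else if mc = 1 then 2 + solveGo fuel (r - 1) 2
       else 1 + mc + solveGo fuel (r - mc) (mc * 2)) := rfl

lemma altCount_succ (fuel : Nat) (m target : Int) :
    altCount (fuel + 1) m target = (if m < target then 1 + altCount fuel (2 * m) target else 0) := rfl

lemma solveGo_closed (fuel : Nat) : ∀ (r mc : Int), 1 ≤ mc → 0 < r → r ≤ (fuel : Int) →
    solveGo (fuel + 1) r mc = r + 1 + altCount fuel (2 * mc) (r + mc) := by
  induction fuel with
  | zero => intro r mc _ hr hle; exact absurd hle (by omega)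
  | succ n ih =>
    intro r mc hmc hr hle
    rw [solveGo_succ (n + 1), altCount_succ n]
    have hr0 : ¬ r = 0 := by omega
    rw [if_neg hr0]
    by_cases hge : mc ≥ r
    · rw [if_pos hge, if_neg (show ¬ (2 * mc < r + mc) by omega)]
      ring
    · rw [if_neg hge, if_pos (show 2 * mc < r + mc by omega)]
      by_cases h1 : mc = 1
      · subst h1
        rw [if_pos rfl, ih (r - 1) 2 (by omega) (by omega) (by omega)]
        have h4 : (2 : Int) * 2 = 2 * (2 * 1) := by ring
        have ht : r - 1 + 2 = r + 1 := by ring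
        rw [h4, ht]
        ring
      · rw [if_neg h1, ih (r - mc) (mc * 2) (by omega) (by omega) (by omega)]
        have h4 : 2 * (mc * 2) = 2 * (2 * mc) := by ring
        have ht : r - mc + mc * 2 = r + mc := by ring
        rw [h4, ht]
        ring

-- ===== VERDICT (by name: the statement is the Claim_ definition above) =====
theorem solve_spec : Claim_equal_solve := by
  intro r mc _ hpre
  unfold Spec_solve solve solve_alt
  rcases lt_trichotomy r 0 with hneg | hzero | hpos
  · -- r < 0: Pre forces mc ≥ r; both sides are 1 + r
    have hge : mc ≥ r := by rcases hpre with h | h | h <;> omega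
    have ht : r.toNat = 0 := by omega
    rw [ht]
    simp only [solveGo, altCount, if_neg (show ¬ r = 0 by omega), if_pos hge]
    ring
  · subst hzero; simp [solveGo]
  · have hmc : 1 ≤ mc := by rcases hpre with h | h | h <;> omega
    have := solveGo_closed r.toNat r mc hmc hpos (by omega)
    rw [this, if_neg (show ¬ r = 0 by omega)]
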